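-- pv_equiv track=rewrite | github.com/MarissaMC/NLP_Perceptron | postagging/postag.py | word_type
-- ===== SOURCE A (Python) =====
-- import string
--
-- pun=set(string.punctuation)
--
-- def word_type(word):
--     buf=''
--     for w in word:
--         if w.isupper():
--            if buf[-1:]!='A':
--               buf+='A'
--         if w.islower():
--            if buf[-1:]!='a':
--               buf+='a'
--         if w in '0123456789':
--            if buf[-1:]!='9':
--               buf+='9'
--         if w in pun:
--            if buf[-1:]!='-':
--               buf+='-'
--     return buf
-- ===== SOURCE B (Python) =====
-- import string
--
-- def _symbol(ch):
--     if ch.isupper():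
--         return 'A'
--     if ch.islower():
--         return 'a'
--     if ch in '0123456789':
--         return '9'
--     if ch in string.punctuation:
--         return '-'
--     return ''
--
-- def word_type(word):
--     n = len(word)
--     if n == 0:
--         return ''
--     if n == 1:
--         return _symbol(word)
--     left = word_type(word[:n // 2])
--     right = word_type(word[n // 2:])
--     if left and right and left[-1] == right[0]:
--         return left + right[1:]
--     return left + right
-- ===== Notes on version B (the rewrite author's own statement) =====
-- stated objective: alternative
-- what changed: Replaces the sequential last-char-tracking append loop by a divide-and-conquer recursion: the signature of a word is the signatures of its two halves merged, fusing the boundary when the left signature ends with the symbol the right one starts with.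
import Mathlib
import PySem

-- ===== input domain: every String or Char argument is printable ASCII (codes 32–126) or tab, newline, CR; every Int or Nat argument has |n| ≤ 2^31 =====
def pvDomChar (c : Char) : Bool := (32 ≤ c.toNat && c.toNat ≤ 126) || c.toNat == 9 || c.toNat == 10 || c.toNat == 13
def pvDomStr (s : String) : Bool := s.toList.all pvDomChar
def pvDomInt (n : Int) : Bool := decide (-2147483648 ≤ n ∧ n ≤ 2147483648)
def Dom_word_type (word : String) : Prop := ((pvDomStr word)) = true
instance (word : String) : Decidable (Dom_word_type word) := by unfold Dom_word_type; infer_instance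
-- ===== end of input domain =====

-- B replaces A's sequential last-char-tracking append loop by a divide-and-conquer
-- recursion merging the two halves' signatures (fusing equal boundary symbols); objective: alternative.

-- ===== PORT A =====
-- string.punctuation, as the Python set `pun` (membership only)
def wtPun : PySem.Set Char := PySem.Set.ofList "!\"#$%&'()*+,-./:;<=>?@[\\]^_`{|}~".toList
-- '0123456789' (the literal Python string the membership test runs over)
def wtDigits : List Char := "0123456789".toList

-- the loop body: four independent `if` statements, each guarded by `buf[-1:] != <sym>`
-- (buf[-1:] compared with a one-char string = last element check, none for empty buf)
def wtStep (buf : List Char) (w : Char) : List Char :=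
  let buf := if PySem.Chars.isupper w then
               (if buf.getLast? ≠ some 'A' then buf ++ ['A'] else buf) else buf
  let buf := if PySem.Chars.islower w then
               (if buf.getLast? ≠ some 'a' then buf ++ ['a'] else buf) else buf
  let buf := if wtDigits.contains w then
               (if buf.getLast? ≠ some '9' then buf ++ ['9'] else buf) else buf
  let buf := if wtPun.contains w then
               (if buf.getLast? ≠ some '-' then buf ++ ['-'] else buf) else buf
  buf

def word_type (word : String) : String :=
  String.ofList (word.toList.foldl wtStep [])

-- ===== PORT B =====
-- _symbol: the one-character class string of a character, '' if unclassified
def wtSym (ch : Char) : List Char :=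
  if PySem.Chars.isupper ch then ['A']
  else if PySem.Chars.islower ch then ['a']
  else if wtDigits.contains ch then ['9']
  else if wtPun.contains ch then ['-']
  else []

-- `if left and right and left[-1]==right[0]: left+right[1:] else: left+right`
def wtMerge (a b : List Char) : List Char :=
  if a ≠ [] ∧ b ≠ [] ∧ a.getLast? = b.head? then a ++ b.tail else a ++ b

-- the divide-and-conquer body of Source B's word_type, on the character list
-- (the fuel argument only bounds the recursion depth: length-many steps always suffice,
-- since both halves are strictly shorter; it changes no computed value)
def wtDCF : Nat → List Char → List Char
  | 0, _ => []
  | n + 1, l =>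
    if l.length = 0 then []
    else if l.length = 1 then wtSym l.head!
    else wtMerge (wtDCF n (l.take (l.length / 2))) (wtDCF n (l.drop (l.length / 2)))

def wtDC (l : List Char) : List Char := wtDCF l.length l

def word_type_alt (word : String) : String :=
  String.ofList (wtDC word.toList)

-- ===== PRECONDITION & SPEC =====
def Spec_word_type (word : String) (out : String) : Prop := out = word_type_alt word
instance (word : String) (out : String) : Decidable (Spec_word_type word out) := by unfold Spec_word_type; infer_instance

-- ===== CLAIM (what is proved, stated in full; the proofs are below) =====
def Claim_equal_word_type : Prop := ∀ (word : String), Dom_word_type word → Spec_word_type word (word_type word)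

-- ===== LEMMAS AND PROOFS =====

-- the four character classes are mutually exclusive
lemma wt_up_lo {c : Char} (h : PySem.Chars.isupper c = true) : PySem.Chars.islower c = false := by
  simp [PySem.Chars.isupper, Char.le_def, UInt32.le_iff_toNat_le] at h
  simp [PySem.Chars.islower, Char.le_def, UInt32.le_iff_toNat_le]
  omega

lemma wt_dig {c : Char} (h : c ∈ wtDigits) :
    PySem.Chars.isupper c = false ∧ PySem.Chars.islower c = false := by
  simp [wtDigits] at h
  rcases h with rfl|rfl|rfl|rfl|rfl|rfl|rfl|rfl|rfl|rfl <;> decide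

lemma wt_pun {c : Char} (h : c ∈ wtPun) :
    PySem.Chars.isupper c = false ∧ PySem.Chars.islower c = false ∧ c ∉ wtDigits := by
  simp [wtPun, PySem.Set.ofList] at h
  rcases h with rfl|rfl|rfl|rfl|rfl|rfl|rfl|rfl|rfl|rfl|rfl|rfl|rfl|rfl|rfl|rfl|rfl|rfl|rfl|rfl|rfl|rfl|rfl|rfl|rfl|rfl|rfl|rfl|rfl|rfl|rfl|rfl <;> decide

-- A's loop body, expressed through B's classifier
lemma wtStep_eq (buf : List Char) (c : Char) :
    wtStep buf c = match wtSym c with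
      | [] => buf
      | s :: _ => if buf.getLast? = some s then buf else buf ++ [s] := by
  by_cases hu : PySem.Chars.isupper c = true
  · have hl := wt_up_lo hu
    have hd : c ∉ wtDigits := fun h => by simpa [hu] using (wt_dig h).1
    have hp : c ∉ wtPun := fun h => by simpa [hu] using (wt_pun h).1
    simp [wtStep, wtSym, hu, hl, hd, hp]
  · by_cases hl : PySem.Chars.islower c = true
    · have hd : c ∉ wtDigits := fun h => by simpa [hl] using (wt_dig h).2
      have hp : c ∉ wtPun := fun h => by simpa [hl] using (wt_pun h).2.1
      simp [wtStep, wtSym, hu, hl, hd, hp]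
    · by_cases hd : c ∈ wtDigits
      · have hp : c ∉ wtPun := fun h => (wt_pun h).2.2 hd
        simp [wtStep, wtSym, hu, hl, hd, hp]
      · by_cases hp : c ∈ wtPun
        · simp [wtStep, wtSym, hu, hl, hd, hp]
        · simp [wtStep, wtSym, hu, hl, hd, hp]

-- collapse of adjacent duplicates, tracking the last emitted symbol (the common spec)
def wtCFrom : Option Char → List Char → List Char
  | _, [] => []
  | last, c :: rest => if last = some c then wtCFrom last rest else c :: wtCFrom (some c) rest

lemma wtCFrom_cons_eq (c : Char) (rest : List Char) :
    wtCFrom (some c) (c :: rest) = wtCFrom (some c) rest := by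
  simp [wtCFrom]

lemma wtCFrom_cons_ne (last : Option Char) (c : Char) (rest : List Char) (h : last ≠ some c) :
    wtCFrom last (c :: rest) = c :: wtCFrom (some c) rest := by
  simp [wtCFrom, h]

-- A's fold builds exactly the collapse of the classified symbols
lemma wt_foldl (l : List Char) (buf : List Char) :
    l.foldl wtStep buf = buf ++ wtCFrom buf.getLast? (l.flatMap wtSym) := by
  induction l generalizing buf with
  | nil => simp [wtCFrom]
  | cons c l ih =>
    rw [List.foldl_cons, ih (wtStep buf c), wtStep_eq]
    cases h : wtSym c with
    | nil => simp [h]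
    | cons s t =>
      have ht : t = [] := by
        unfold wtSym at h; split_ifs at h <;> simp_all
      subst ht
      simp only [List.flatMap_cons, h]
      by_cases hb : buf.getLast? = some s
      · simp [hb, wtCFrom]
      · simp [hb, wtCFrom, List.getLast?_append]

lemma wt_last_cons (c : Char) (rest : List Char) :
    (c :: rest).getLast? = rest.getLast?.or (some c) := by
  induction rest generalizing c with
  | nil => rfl
  | cons d t ih =>
    rw [List.getLast?_cons_cons, ih d]
    cases t.getLast? <;> rfl

-- last emitted symbol of a collapse, modulo the starting context
lemma wt_cfrom_last (u : List Char) : ∀ last,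
    (wtCFrom last u).getLast?.or last = u.getLast?.or last := by
  induction u with
  | nil => intro last; simp [wtCFrom]
  | cons c rest ih =>
    intro last
    by_cases h : last = some c
    · subst h
      rw [wtCFrom_cons_eq, ih, wt_last_cons]
      cases rest.getLast? <;> rfl
    · rw [wtCFrom_cons_ne _ _ _ h, wt_last_cons, ih (some c), wt_last_cons]

-- collapse distributes over append, the right part starting from the left's last symbol
lemma wt_cfrom_append (u v : List Char) : ∀ last,
    wtCFrom last (u ++ v) = wtCFrom last u ++ wtCFrom (u.getLast?.or last) v := by
  induction u with
  | nil => intro last; simp [wtCFrom]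
  | cons c rest ih =>
    intro last
    by_cases h : last = some c
    · subst h
      rw [List.cons_append, wtCFrom_cons_eq, ih, wtCFrom_cons_eq, wt_last_cons]
      cases rest.getLast? <;> rfl
    · rw [List.cons_append, wtCFrom_cons_ne _ _ _ h, wtCFrom_cons_ne _ _ _ h, ih (some c),
          wt_last_cons]
      cases rest.getLast? <;> simp

-- B's merge of two collapses is the collapse of the concatenation
lemma wt_merge_eq (su sv : List Char) :
    wtMerge (wtCFrom none su) (wtCFrom none sv)
      = wtCFrom none su ++ wtCFrom su.getLast? sv := by
  cases su with
  | nil => simp [wtCFrom, wtMerge]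
  | cons c rest =>
    cases sv with
    | nil => simp [wtMerge, wtCFrom]
    | cons d t =>
      have hA : wtCFrom none (c :: rest) = c :: wtCFrom (some c) rest :=
        wtCFrom_cons_ne _ _ _ (by simp)
      have hB : wtCFrom none (d :: t) = d :: wtCFrom (some d) t :=
        wtCFrom_cons_ne _ _ _ (by simp)
      have hlast : (wtCFrom none (c :: rest)).getLast? = (c :: rest).getLast? := by
        have := wt_cfrom_last (c :: rest) none
        simpa using this
      by_cases hdx : (c :: rest).getLast? = some d
      · rw [wtMerge, if_pos ⟨by simp [hA], by simp [hB],
            by rw [hlast, hB]; simpa using hdx⟩]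
        rw [hB, hdx, wtCFrom_cons_eq, List.tail_cons]
      · rw [wtMerge, if_neg (by
          rintro ⟨-, -, h3⟩
          rw [hlast, hB] at h3
          exact hdx (by simpa using h3))]
        rw [wtCFrom_cons_ne _ _ _ hdx, hB]

-- short symbol lists collapse to themselves
lemma wt_cfrom_short (s : List Char) (h : s.length ≤ 1) : wtCFrom none s = s := by
  match s, h with
  | [], _ => rfl
  | [c], _ => simp [wtCFrom]

lemma wt_sym_short (c : Char) : (wtSym c).length ≤ 1 := by
  unfold wtSym; split_ifs <;> simp

-- B computes the collapse of the classified symbols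
lemma wtDCF_eq : ∀ n (l : List Char), l.length ≤ n →
    wtDCF n l = wtCFrom none (l.flatMap wtSym) := by
  intro n
  induction n with
  | zero =>
    intro l hl
    have : l = [] := List.eq_nil_of_length_eq_zero (Nat.le_zero.mp hl)
    subst this; rfl
  | succ n ih =>
    intro l hl
    by_cases h0 : l.length = 0
    · have : l = [] := List.eq_nil_of_length_eq_zero h0
      subst this; rfl
    · by_cases h1 : l.length = 1
      · obtain ⟨c, rfl⟩ : ∃ c, l = [c] := by
          cases l with
          | nil => simp at h1
          | cons c t =>
            cases t with
            | nil => exact ⟨c, rfl⟩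
            | cons d t => simp at h1
        simp [wtDCF, List.head!, wt_cfrom_short _ (wt_sym_short c)]
      · rw [wtDCF, if_neg h0, if_neg h1]
        rw [ih (l.take (l.length / 2)) (by simp; omega),
            ih (l.drop (l.length / 2)) (by simp; omega)]
        rw [wt_merge_eq]
        conv_rhs => rw [← List.take_append_drop (l.length / 2) l]
        rw [List.flatMap_append, wt_cfrom_append]
        simp

-- ===== VERDICT (by name: the statement is the Claim_ definition above) =====
theorem word_type_spec : Claim_equal_word_type := by
  intro word _
  unfold Spec_word_type word_type word_type_alt
  rw [wt_foldl]
  rw [show wtDC word.toList = wtCFrom none (word.toList.flatMap wtSym) from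
    wtDCF_eq word.toList.length word.toList le_rfl]
  simp
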